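-- pv_equiv track=rewrite | github.com/vssdvns/VideoWaterMarker | src/app_watermark_ui.py | _lookup_fingerprint
-- ===== SOURCE A (Python) =====
-- def _hamming_distance_8(a: int, b: int) -> int:
--     """Number of differing bits between two 8-bit values."""
--     x = (a ^ b) & 0xFF
--     return bin(x).count("1")
--
-- def _lookup_fingerprint(extracted_id: int, registry: dict, max_distance: int = 2) -> list[tuple[str, int]]:
--     """
--     Find registry entries whose fingerprint is within max_distance (Hamming) of extracted_id.
--     Returns [(user_id, distance), ...] sorted by distance.
--     """
--     # The neural extractor can be a few bits off after attacks, so this helper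
--     # performs a fuzzy registry lookup instead of requiring an exact byte match.
--     results = []
--     for fid_str, user_id in registry.items():
--         try:
--             fid = int(fid_str) if isinstance(fid_str, str) and fid_str.isdigit() else int(fid_str, 16 if "x" in str(fid_str).lower() else 10)
--         except (ValueError, TypeError):
--             continue
--         fid &= 0xFF
--         d = _hamming_distance_8(extracted_id, fid)
--         if d <= max_distance:
--             results.append((str(user_id), d))
--     return sorted(results, key=lambda x: x[1])
-- ===== SOURCE B (Python) =====
-- def _lookup_fingerprint(extracted_id: int, registry: dict, max_distance: int = 2) -> list[tuple[str, int]]: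
--     """Fuzzy registry lookup as a staged pipeline: map each entry to an optional
--     (user_id, distance) match, keep the hits, then group them counting-sort style
--     by concatenating the per-distance filters for d = 0..8 (an 8-bit Hamming
--     distance is always in 0..8), which reproduces sorted's stable order."""
--
--     def parse(key):
--         base = 16 if "x" in str(key).lower() else 10
--         try:
--             return int(key) if isinstance(key, str) and key.isdigit() else int(key, base)
--         except (ValueError, TypeError):
--             return None
--
--     def match(item):
--         fid = parse(item[0])
--         if fid is None:
--             return None
--         fid &= 0xFF
--         d = ((extracted_id ^ fid) & 0xFF).bit_count()
--         return (str(item[1]), d) if d <= max_distance else None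
--
--     matches = [m for m in map(match, registry.items()) if m is not None]
--     return [entry for d in range(9) for entry in matches if entry[1] == d]
-- ===== Notes on version B (the rewrite author's own statement) =====
-- stated objective: alternative
-- what changed: Replaces A's accumulate-then-comparison-sort loop by a staged pipeline: map each registry item to an optional (user_id, distance) match, filter out the misses, then group the hits counting-sort style by concatenating the per-distance filters for d = 0..8 (an 8-bit Hamming distance is always 0..8), which reproduces sorted's stable order; the distance uses int.bit_count on the masked XOR instead of counting '1' characters of bin().
import Mathlib
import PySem

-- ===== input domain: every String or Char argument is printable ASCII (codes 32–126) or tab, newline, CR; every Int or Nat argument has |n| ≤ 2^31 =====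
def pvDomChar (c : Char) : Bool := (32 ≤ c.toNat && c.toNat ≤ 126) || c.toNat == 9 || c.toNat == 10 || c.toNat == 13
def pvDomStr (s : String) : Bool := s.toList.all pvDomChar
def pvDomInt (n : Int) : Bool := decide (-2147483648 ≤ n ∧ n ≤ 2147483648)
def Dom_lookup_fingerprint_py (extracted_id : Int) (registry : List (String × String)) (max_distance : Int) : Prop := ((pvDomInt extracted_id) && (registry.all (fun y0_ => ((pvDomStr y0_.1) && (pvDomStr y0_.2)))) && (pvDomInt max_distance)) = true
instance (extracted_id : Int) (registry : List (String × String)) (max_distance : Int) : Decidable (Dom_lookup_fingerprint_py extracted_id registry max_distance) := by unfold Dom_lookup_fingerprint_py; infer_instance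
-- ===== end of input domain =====

-- B replaces A's accumulate-then-comparison-sort loop by a staged pipeline (map each
-- item to an optional match, drop the misses, concatenate the per-distance filters for
-- d = 0..8 in order — counting-sort style), producing the same value; no speed claim.

-- ===== PORT A =====
-- try/parse of the registry key: returns none exactly where Python's except-branch fires
def pvParseFidA (fid_str : String) : Option Int :=
  if PySem.Str.strIsdigit fid_str then PySem.Int.ofStr? fid_str
  else PySem.Int.ofStrBase? fid_str (if PySem.Str.isIn "x" (PySem.Str.lower fid_str) then 16 else 10)

-- _hamming_distance_8: bin((a ^ b) & 0xFF).count("1")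
def pvHamming8A (a b : Int) : Int :=
  (PySem.Str.count (PySem.Int.pyBin (PySem.Int.band (PySem.Int.bxor a b) 255)) "1" : Int)

def lookup_fingerprint_py (extracted_id : Int) (registry : List (String × String)) (max_distance : Int) : List (String × Int) :=
  let results := registry.foldl (fun acc p =>
    match pvParseFidA p.1 with
    | none => acc
    | some fid0 =>
      let fid := PySem.Int.band fid0 255
      let d := pvHamming8A extracted_id fid
      if d ≤ max_distance then acc ++ [(p.2, d)] else acc) []
  PySem.List.sorted results (fun x => x.2) false

-- ===== PORT B =====
-- Source B's nested 'parse': base computed first, then the try/int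
def pvParseB (key : String) : Option Int :=
  let base : Int := if PySem.Str.isIn "x" (PySem.Str.lower key) then 16 else 10
  if PySem.Str.strIsdigit key then PySem.Int.ofStr? key else PySem.Int.ofStrBase? key base

-- Source B's nested 'match': optional (user_id, distance), distance via bit_count
def pvMatchB (eid md : Int) (item : String × String) : Option (String × Int) :=
  match pvParseB item.1 with
  | none => none
  | some fid0 =>
    let fid := PySem.Int.band fid0 255
    let d : Int := PySem.Int.bitCount (PySem.Int.band (PySem.Int.bxor eid fid) 255)
    if d ≤ md then some (item.2, d) else none

def lookup_fingerprint_py_alt (extracted_id : Int) (registry : List (String × String)) (max_distance : Int) : List (String × Int) :=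
  let hits := (registry.map (pvMatchB extracted_id max_distance)).filterMap id
  (List.range 9).flatMap (fun d => hits.filter (fun entry => entry.2 == ((d : Nat) : Int)))

-- ===== PRECONDITION & SPEC =====
def Spec_lookup_fingerprint_py (extracted_id : Int) (registry : List (String × String)) (max_distance : Int) (out : List (String × Int)) : Prop := out = lookup_fingerprint_py_alt extracted_id registry max_distance
instance (extracted_id : Int) (registry : List (String × String)) (max_distance : Int) (out : List (String × Int)) : Decidable (Spec_lookup_fingerprint_py extracted_id registry max_distance out) := by unfold Spec_lookup_fingerprint_py; infer_instance

-- ===== CLAIM (what is proved, stated in full; the proofs are below) =====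
def Claim_equal_lookup_fingerprint_py : Prop := ∀ (extracted_id : Int) (registry : List (String × String)) (max_distance : Int), Dom_lookup_fingerprint_py extracted_id registry max_distance → Spec_lookup_fingerprint_py extracted_id registry max_distance (lookup_fingerprint_py extracted_id registry max_distance)

-- ===== LEMMAS AND PROOFS =====

-- A's fold body, named for the proofs (definitionally the lambda in the port)
def pvStepA (eid md : Int) (acc : List (String × Int)) (p : String × String) : List (String × Int) :=
  match pvParseFidA p.1 with
  | none => acc
  | some fid0 =>
    let fid := PySem.Int.band fid0 255
    let d := pvHamming8A eid fid
    if d ≤ md then acc ++ [(p.2, d)] else acc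

-- a & 0xFF lies in [0, 256)
theorem pv_band255_bounds (a : Int) : 0 ≤ PySem.Int.band a 255 ∧ PySem.Int.band a 255 < 256 := by
  by_cases h : 0 ≤ a
  · have hb : (0:Int) ≤ 255 := by norm_num
    simp only [PySem.Int.band, h, hb, if_true]
    have := Nat.and_le_right (n := a.toNat) (m := (255:Int).toNat)
    constructor <;> omega
  · have hb : (0:Int) ≤ 255 := by norm_num
    simp only [PySem.Int.band, h, hb, if_false, if_true]
    omega

set_option maxRecDepth 8192 in
-- the 8-bit popcount table: bin(n).count("1") = n.bit_count() ≤ 8 for n < 256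
theorem pv_ham_tbl : ∀ n : Fin 256, PySem.Str.count (PySem.Int.pyBin ((n : Nat) : Int)) "1" = PySem.Int.bitCount ((n : Nat) : Int) ∧ PySem.Int.bitCount ((n : Nat) : Int) ≤ 8 := by decide

theorem pv_ham_eq (a b : Int) : ∃ dn : Nat, dn < 9 ∧ pvHamming8A a b = (dn : Int) ∧ (PySem.Int.bitCount (PySem.Int.band (PySem.Int.bxor a b) 255) : Int) = (dn : Int) := by
  obtain ⟨h0, h1⟩ := pv_band255_bounds (PySem.Int.bxor a b)
  set x := PySem.Int.band (PySem.Int.bxor a b) 255 with hx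
  have hlt : x.toNat < 256 := by omega
  have hxn : x = ((x.toNat : Nat) : Int) := by omega
  have hc : PySem.Str.count (PySem.Int.pyBin ((x.toNat : Nat) : Int)) "1"
      = PySem.Int.bitCount ((x.toNat : Nat) : Int) := (pv_ham_tbl ⟨x.toNat, hlt⟩).1
  have hle : PySem.Int.bitCount ((x.toNat : Nat) : Int) ≤ 8 := (pv_ham_tbl ⟨x.toNat, hlt⟩).2
  refine ⟨PySem.Int.bitCount x, ?_, ?_, rfl⟩
  · rw [hxn]; omega
  · show (PySem.Str.count (PySem.Int.pyBin x) "1" : Int) = (PySem.Int.bitCount x : Int)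
    rw [hxn]; exact_mod_cast hc

-- A's accumulation loop builds exactly B's list of surviving matches
theorem pv_foldA_eq_matches (eid md : Int) : ∀ (reg : List (String × String)) (acc : List (String × Int)),
    reg.foldl (pvStepA eid md) acc = acc ++ (reg.map (pvMatchB eid md)).filterMap id := by
  intro reg
  induction reg with
  | nil => intro acc; simp
  | cons p t ih =>
    intro acc
    rw [List.foldl_cons, ih, List.map_cons, List.filterMap_cons]
    cases hp : pvParseFidA p.1 with
    | none =>
      have hstep : pvStepA eid md acc p = acc := by unfold pvStepA; rw [hp]
      have hm : pvMatchB eid md p = none := by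
        unfold pvMatchB; rw [show pvParseB = pvParseFidA from rfl, hp]
      rw [hstep, hm]; rfl
    | some fid0 =>
      obtain ⟨dn, hdn9, hA, hB⟩ := pv_ham_eq eid (PySem.Int.band fid0 255)
      have hstep : pvStepA eid md acc p
          = (if ((dn : Nat) : Int) ≤ md then acc ++ [(p.2, ((dn : Nat) : Int))] else acc) := by
        unfold pvStepA; rw [hp]; simp only [hA]
      have hm : pvMatchB eid md p
          = (if ((dn : Nat) : Int) ≤ md then some (p.2, ((dn : Nat) : Int)) else none) := by
        unfold pvMatchB; rw [show pvParseB = pvParseFidA from rfl, hp]; simp only [hB]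
      rw [hstep, hm]
      by_cases hle : ((dn : Nat) : Int) ≤ md
      · simp [hle]
      · simp [hle]

theorem pv_insertBy_append_not_before {α : Type} (bf : α → α → Bool) (x : α) (ys zs : List α)
    (h : ∀ y ∈ ys, bf x y = false) :
    PySem.List.insertBy bf x (ys ++ zs) = ys ++ PySem.List.insertBy bf x zs := by
  induction ys with
  | nil => rfl
  | cons y t ih =>
    have hy := h y (List.mem_cons_self)
    simp only [List.cons_append, PySem.List.insertBy, hy, Bool.false_eq_true, if_false]
    rw [ih (fun z hz => h z (List.mem_cons_of_mem _ hz))]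

theorem pv_insertBy_all_before {α : Type} (bf : α → α → Bool) (x : α) (ys : List α)
    (h : ∀ y ∈ ys, bf x y = true) :
    PySem.List.insertBy bf x ys = x :: ys := by
  cases ys with
  | nil => rfl
  | cons y t => simp only [PySem.List.insertBy, h y (List.mem_cons_self), if_true]

-- inserting an element with key dn into the flattened buckets appends it to bucket dn
theorem pv_insertBy_flatten (ks : List Nat) (g : Nat → List (String × Int)) (dn : Nat) (x : String × Int)
    (hmem : dn ∈ ks) (hs : ks.Pairwise (· < ·))
    (hg : ∀ k ∈ ks, ∀ p ∈ g k, p.2 = (k : Int)) (hx : x.2 = (dn : Int)) :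
    PySem.List.insertBy (fun a b => decide (a.2 < b.2)) x ((ks.map g).flatten)
      = (ks.map (fun k => if k = dn then g dn ++ [x] else g k)).flatten := by
  induction ks with
  | nil => cases hmem
  | cons k t ih =>
    simp only [List.map_cons, List.flatten_cons]
    by_cases hk : k = dn
    · subst hk
      have h1 : ∀ y ∈ g k, (fun a b : String × Int => decide (a.2 < b.2)) x y = false := by
        intro y hy
        have := hg k List.mem_cons_self y hy
        simp [this, hx]
      rw [pv_insertBy_append_not_before _ _ _ _ h1]
      have h2 : ∀ y ∈ (t.map g).flatten, (fun a b : String × Int => decide (a.2 < b.2)) x y = true := by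
        intro y hy
        obtain ⟨l, hl, hyl⟩ := List.mem_flatten.mp hy
        obtain ⟨j, hj, rfl⟩ := List.mem_map.mp hl
        have hkj : k < j := (List.pairwise_cons.mp hs).1 j hj
        have := hg j (List.mem_cons_of_mem _ hj) y hyl
        simp only [decide_eq_true_eq, hx, this]
        exact_mod_cast hkj
      rw [pv_insertBy_all_before _ _ _ h2]
      have h3 : t.map (fun j => if j = k then g k ++ [x] else g j) = t.map g := by
        apply List.map_congr_left
        intro j hj
        have hkj : k < j := (List.pairwise_cons.mp hs).1 j hj
        simp [Nat.ne_of_gt hkj]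
      simp [h3]
    · have hd : dn ∈ t := by
        rcases List.mem_cons.mp hmem with h | h
        · exact absurd h.symm hk
        · exact h
      have hkd : k < dn := (List.pairwise_cons.mp hs).1 dn hd
      have h1 : ∀ y ∈ g k, (fun a b : String × Int => decide (a.2 < b.2)) x y = false := by
        intro y hy
        have := hg k List.mem_cons_self y hy
        simp only [decide_eq_false_iff_not, not_lt, hx, this]
        exact_mod_cast Nat.le_of_lt hkd
      rw [pv_insertBy_append_not_before _ _ _ _ h1]
      rw [ih hd (List.pairwise_cons.mp hs).2 (fun j hj => hg j (List.mem_cons_of_mem _ hj))]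
      simp [hk]

-- one filtered bucket only holds pairs with that key
theorem pv_filter_key (r : List (String × Int)) (k : Nat) :
    ∀ p ∈ r.filter (fun p => p.2 == (k : Int)), p.2 = (k : Int) := by
  intro p hp
  have := List.of_mem_filter hp
  simpa using this

-- filters of r ++ [x] when x's key is dn
theorem pv_filter_append_key (r : List (String × Int)) (x : String × Int) (dn : Nat) (hx : x.2 = (dn : Int)) :
    ∀ k : Nat, (r ++ [x]).filter (fun p => p.2 == (k : Int)) =
      (if k = dn then r.filter (fun p => p.2 == ((dn : Nat) : Int)) ++ [x]
        else r.filter (fun p => p.2 == (k : Int))) := by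
  intro k
  rw [List.filter_append]
  by_cases hk : k = dn
  · subst hk
    simp [hx]
  · have hb : (x.2 == (k : Int)) = false := by
      simp only [hx, beq_eq_false_iff_ne, ne_eq, Int.natCast_inj]
      exact fun hdk => hk hdk.symm
    simp [hb, hk]

-- sorting a list whose keys all lie in 0..8 concatenates its nine per-key filters in order
theorem pv_sorted_buckets : ∀ (r : List (String × Int)),
    (∀ p ∈ r, ∃ dn : Nat, dn < 9 ∧ p.2 = (dn : Int)) →
    PySem.List.sorted r (fun x => x.2) false
      = ((List.range 9).map (fun k : Nat => r.filter (fun p => p.2 == (k : Int)))).flatten := by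
  intro r
  induction r using List.reverseRecOn with
  | nil => intro _; rfl
  | append_singleton r x ih =>
    intro h
    obtain ⟨dn, hdn9, hx⟩ := h x (List.mem_append_right _ List.mem_cons_self)
    have hr := ih (fun p hp => h p (List.mem_append_left _ hp))
    have hsorted : PySem.List.sorted (r ++ [x]) (fun y => y.2) false
        = PySem.List.insertBy (fun a b => decide (a.2 < b.2)) x (PySem.List.sorted r (fun y => y.2) false) := by
      rw [PySem.List.sorted_eq_foldl_insertBy, PySem.List.sorted_eq_foldl_insertBy, List.foldl_append,
        List.foldl_cons, List.foldl_nil]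
    rw [hsorted, hr,
      pv_insertBy_flatten (List.range 9) _ dn x (List.mem_range.mpr hdn9) List.pairwise_lt_range
        (fun k _ => pv_filter_key r k) hx]
    have hmaps : (List.range 9).map (fun k : Nat => (r ++ [x]).filter (fun p => p.2 == (k : Int)))
        = (List.range 9).map (fun k : Nat => if k = dn then r.filter (fun p => p.2 == ((dn : Nat) : Int)) ++ [x] else r.filter (fun p => p.2 == (k : Int))) :=
      List.map_congr_left (fun k _ => pv_filter_append_key r x dn hx k)
    rw [hmaps]

-- every surviving match carries a distance in 0..8
theorem pv_matches_keys (eid md : Int) (reg : List (String × String)) :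
    ∀ p ∈ (reg.map (pvMatchB eid md)).filterMap id, ∃ dn : Nat, dn < 9 ∧ p.2 = (dn : Int) := by
  intro p hp
  obtain ⟨o, ho, hop⟩ := List.mem_filterMap.mp hp
  obtain ⟨q, _, rfl⟩ := List.mem_map.mp ho
  have hsome : pvMatchB eid md q = some p := hop
  unfold pvMatchB at hsome
  cases hq : pvParseB q.1 with
  | none => rw [hq] at hsome; cases hsome
  | some fid0 =>
    rw [hq] at hsome
    dsimp only at hsome
    obtain ⟨dn, hdn9, _, hB⟩ := pv_ham_eq eid (PySem.Int.band fid0 255)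
    by_cases hle : (PySem.Int.bitCount (PySem.Int.band (PySem.Int.bxor eid (PySem.Int.band fid0 255)) 255) : Int) ≤ md
    · rw [if_pos hle] at hsome
      obtain rfl := Option.some.inj hsome
      exact ⟨dn, hdn9, hB⟩
    · rw [if_neg hle] at hsome
      cases hsome

-- ===== VERDICT (by name: the statement is the Claim_ definition above) =====
theorem lookup_fingerprint_py_spec : Claim_equal_lookup_fingerprint_py := by
  intro eid reg md _
  show lookup_fingerprint_py eid reg md = lookup_fingerprint_py_alt eid reg md
  have hA : lookup_fingerprint_py eid reg md
      = PySem.List.sorted (reg.foldl (pvStepA eid md) []) (fun x => x.2) false := rfl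
  rw [hA, pv_foldA_eq_matches eid md reg [], List.nil_append,
    pv_sorted_buckets _ (pv_matches_keys eid md reg)]
  simp only [lookup_fingerprint_py_alt, List.flatMap_def]
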